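-- pv_equiv track=rewrite | github.com/DvirLehrer/cropper | src/lighting_normalization.py | _fill_mask_lr_continuum
-- ===== SOURCE A (Python) =====
-- def _fill_mask_lr_continuum(px: list[int], mask: list[bool], width: int, height: int) -> list[int]:
--     out = list(px)
--     for y in range(height):
--         row = y * width
--         x = 0
--         while x < width:
--             i = row + x
--             if not mask[i]:
--                 x += 1
--                 continue
--
--             run_start = x
--             x += 1
--             while x < width and mask[row + x]:
--                 x += 1
--             run_end = x - 1
--
--             lx = run_start - 1
--             if lx < 0 or mask[row + lx]:
--                 lx = -1
--             rx = x
--             if rx >= width or mask[row + rx]: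
--                 rx = -1
--
--             run_len = run_end - run_start + 1
--             if lx >= 0 and rx >= 0 and lx != rx:
--                 lv = px[row + lx]
--                 rv = px[row + rx]
--                 span = rx - lx
--                 for xi in range(run_start, run_end + 1):
--                     t = xi - lx
--                     # Linear interpolation between nearest left/right unmasked samples.
--                     out[row + xi] = ((lv * (span - t)) + (rv * t) + (span // 2)) // span
--             elif lx >= 0:
--                 out[row + run_start : row + run_end + 1] = [px[row + lx]] * run_len
--             elif rx >= 0:
--                 out[row + run_start : row + run_end + 1] = [px[row + rx]] * run_len
--             else:
--                 out[row + run_start : row + run_end + 1] = [255] * run_len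
--     return out
-- ===== SOURCE B (Python) =====
-- def _fill_mask_lr_continuum(px: list[int], mask: list[bool], width: int, height: int) -> list[int]:
--     if width <= 0 or height <= 0:
--         return list(px)
--     out = []
--     for y in range(height):
--         row = y * width
--         # nearest unmasked column at or to the left of x (-1 if none)
--         last = -1
--         left = []
--         for x in range(width):
--             if not mask[row + x]:
--                 last = x
--             left.append(last)
--         # nearest unmasked column at or to the right of x (-1 if none)
--         nxt = -1
--         right_rev = []
--         for x in range(width - 1, -1, -1):
--             if not mask[row + x]:
--                 nxt = x
--             right_rev.append(nxt)
--         right = right_rev[::-1]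
--         for x in range(width):
--             if not mask[row + x]:
--                 out.append(px[row + x])
--             else:
--                 lx, rx = left[x], right[x]
--                 if lx >= 0 and rx >= 0:
--                     span = rx - lx
--                     t = x - lx
--                     out.append((px[row + lx] * (span - t) + px[row + rx] * t + span // 2) // span)
--                 elif lx >= 0:
--                     out.append(px[row + lx])
--                 elif rx >= 0:
--                     out.append(px[row + rx])
--                 else:
--                     out.append(255)
--     out.extend(px[width * height:])
--     return out
-- ===== Notes on version B (the rewrite author's own statement) =====
-- stated objective: alternative
-- what changed: Replaces A's stateful run-scan (nested while loops that detect each maximal masked run and splice-fill it) by three independent linear passes per row: a forward pass building a nearest-unmasked-left table, a backward pass building a nearest-unmasked-right table, and one output-building pass that interpolates each masked pixel from its two table entries.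
-- outside the precondition, e.g. on _fill_mask_lr_continuum([], [False], 1, 1): A returns [], B raises IndexError
import Mathlib
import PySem

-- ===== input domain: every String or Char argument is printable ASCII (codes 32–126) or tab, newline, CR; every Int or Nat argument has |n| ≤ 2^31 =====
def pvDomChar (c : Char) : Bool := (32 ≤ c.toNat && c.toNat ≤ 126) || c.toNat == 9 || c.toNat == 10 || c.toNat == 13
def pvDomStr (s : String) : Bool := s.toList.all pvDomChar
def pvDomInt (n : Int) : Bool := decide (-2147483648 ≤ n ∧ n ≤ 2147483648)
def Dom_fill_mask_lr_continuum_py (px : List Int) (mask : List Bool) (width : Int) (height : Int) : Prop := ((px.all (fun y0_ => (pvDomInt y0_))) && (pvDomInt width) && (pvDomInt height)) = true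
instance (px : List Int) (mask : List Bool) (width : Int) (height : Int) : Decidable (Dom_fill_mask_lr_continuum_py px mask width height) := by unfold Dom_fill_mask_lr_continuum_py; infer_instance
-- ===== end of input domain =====

-- B replaces A's run-scan by per-row nearest-left/right index tables; equivalence of RETURN values is proved (A mutates nothing).

-- ===== PORT A =====
-- inner `while x < width and mask[row + x]: x += 1` of A
def fmFindRunEnd (mask : List Bool) (row width x : Nat) : Nat :=
  if h : x < width ∧ mask.getD (row + x) false then
    fmFindRunEnd mask row width (x + 1)
  else x
termination_by width - x
decreasing_by have := h.1; omega

-- needed for fmScanA's termination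
theorem fmFindRunEnd_ge (mask : List Bool) (row width x : Nat) :
    x ≤ fmFindRunEnd mask row width x := by
  induction x using fmFindRunEnd.induct mask row width with
  | case1 x h ih => rw [fmFindRunEnd, dif_pos h]; omega
  | case2 x h => rw [fmFindRunEnd, dif_neg h]

-- `for xi in range(run_start, run_end + 1): out[row+xi] = …` of A
def fmInterpA (row : Nat) (lv rv span lx : Int) (stop xi : Nat) (out : List Int) : List Int :=
  if _h : xi < stop then
    fmInterpA row lv rv span lx stop (xi + 1)
      (out.set (row + xi)
        (PySem.Int.floordiv (lv * (span - ((xi : Int) - lx)) + rv * ((xi : Int) - lx) + PySem.Int.floordiv span 2) span))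
  else out
termination_by stop - xi

-- the outer `while x < width` loop of A, for one row
def fmScanA (px : List Int) (mask : List Bool) (row width x : Nat) (out : List Int) : List Int :=
  if hx : x < width then
    if mask.getD (row + x) false = false then
      fmScanA px mask row width (x + 1) out
    else
      let runStart := x
      let x1 := fmFindRunEnd mask row width (x + 1)
      let runEnd := x1 - 1
      let lx : Int := if ((runStart : Int) - 1 < 0) ∨ mask.getD (row + ((runStart : Int) - 1).toNat) false then -1 else (runStart : Int) - 1
      let rx : Int := if ((width : Int) ≤ (x1 : Int)) ∨ mask.getD (row + x1) false then -1 else (x1 : Int)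
      let runLen := runEnd - runStart + 1
      let out' :=
        if 0 ≤ lx ∧ 0 ≤ rx ∧ lx ≠ rx then
          fmInterpA row (px.getD (row + lx.toNat) 0) (px.getD (row + rx.toNat) 0) (rx - lx) lx (runEnd + 1) runStart out
        else if 0 ≤ lx then
          out.take (row + runStart) ++ List.replicate runLen (px.getD (row + lx.toNat) 0) ++ out.drop (row + runEnd + 1)
        else if 0 ≤ rx then
          out.take (row + runStart) ++ List.replicate runLen (px.getD (row + rx.toNat) 0) ++ out.drop (row + runEnd + 1)
        else
          out.take (row + runStart) ++ List.replicate runLen 255 ++ out.drop (row + runEnd + 1)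
      fmScanA px mask row width x1 out'
  else out
termination_by width - x
decreasing_by
  · omega
  · have := fmFindRunEnd_ge mask row width (x + 1); omega

def fill_mask_lr_continuum_py (px : List Int) (mask : List Bool) (width : Int) (height : Int) : List Int :=
  (List.range height.toNat).foldl
    (fun out y => fmScanA px mask (y * width.toNat) width.toNat 0 out) px

-- ===== PORT B =====
-- forward pass: nearest unmasked column at or to the left of x (-1 if none)
def fmLeftGo (mask : List Bool) (row width x : Nat) (last : Int) (acc : List Int) : List Int :=
  if _h : x < width then
    let last' := if mask.getD (row + x) false = false then (x : Int) else last
    fmLeftGo mask row width (x + 1) last' (acc ++ [last'])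
  else acc
termination_by width - x

-- backward pass: nearest unmasked column at or to the right of x, collected in descending x order
def fmRightGo (mask : List Bool) (row : Nat) (x : Nat) (nxt : Int) (acc : List Int) : List Int :=
  match x with
  | 0 => acc
  | x + 1 =>
    let nxt' := if mask.getD (row + x) false = false then (x : Int) else nxt
    fmRightGo mask row x nxt' (acc ++ [nxt'])

-- output pass: append each pixel of the row, interpolating masked ones from the two tables
def fmOutGo (px : List Int) (mask : List Bool) (row width : Nat) (left right : List Int) (x : Nat) (out : List Int) : List Int :=
  if _h : x < width then
    let v :=
      if mask.getD (row + x) false = false then px.getD (row + x) 0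
      else
        let lx := left.getD x 0
        let rx := right.getD x 0
        if 0 ≤ lx ∧ 0 ≤ rx then
          let span := rx - lx
          let t := (x : Int) - lx
          PySem.Int.floordiv (px.getD (row + lx.toNat) 0 * (span - t) + px.getD (row + rx.toNat) 0 * t + PySem.Int.floordiv span 2) span
        else if 0 ≤ lx then px.getD (row + lx.toNat) 0
        else if 0 ≤ rx then px.getD (row + rx.toNat) 0
        else 255
    fmOutGo px mask row width left right (x + 1) (out ++ [v])
  else out
termination_by width - x

def fill_mask_lr_continuum_py_alt (px : List Int) (mask : List Bool) (width : Int) (height : Int) : List Int :=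
  if width ≤ 0 ∨ height ≤ 0 then px
  else
    let w := width.toNat
    let h := height.toNat
    ((List.range h).foldl
      (fun out y =>
        let row := y * w
        let left := fmLeftGo mask row w 0 (-1) []
        let right := (fmRightGo mask row w (-1) []).reverse
        fmOutGo px mask row w left right 0 out) [])
      ++ px.drop (w * h)

-- ===== PRECONDITION & SPEC =====
-- Pre_ excludes inputs where px or mask has fewer than width*height entries (for positive width and height):
-- there A indexes or slice-assigns out of range — raising IndexError on most such inputs and otherwise producing
-- accidental effects of out-of-range slicing — and B itself raises IndexError on most of them.
def Pre_fill_mask_lr_continuum_py (px : List Int) (mask : List Bool) (width : Int) (height : Int) : Prop :=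
  0 < width → 0 < height → (width * height ≤ (px.length : Int) ∧ width * height ≤ (mask.length : Int))
instance (px : List Int) (mask : List Bool) (width : Int) (height : Int) : Decidable (Pre_fill_mask_lr_continuum_py px mask width height) := by unfold Pre_fill_mask_lr_continuum_py; infer_instance

def pvWitness_fill_mask_lr_continuum_py : List Int × List Bool × Int × Int :=
  ([10, 0, 20, 5], [false, true, false, true], 2, 2)

def Spec_fill_mask_lr_continuum_py (px : List Int) (mask : List Bool) (width : Int) (height : Int) (out : List Int) : Prop := out = fill_mask_lr_continuum_py_alt px mask width height
instance (px : List Int) (mask : List Bool) (width : Int) (height : Int) (out : List Int) : Decidable (Spec_fill_mask_lr_continuum_py px mask width height out) := by unfold Spec_fill_mask_lr_continuum_py; infer_instance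

-- ===== CLAIM (what is proved, stated in full; the proofs are below) =====
def Claim_equal_fill_mask_lr_continuum_py : Prop := ∀ (px : List Int) (mask : List Bool) (width : Int) (height : Int), Dom_fill_mask_lr_continuum_py px mask width height → Pre_fill_mask_lr_continuum_py px mask width height → Spec_fill_mask_lr_continuum_py px mask width height (fill_mask_lr_continuum_py px mask width height)

-- ===== LEMMAS AND PROOFS =====


-- the common value specification: nearest unmasked column left/right of x in the row, and the filled value
def nlI (mask : List Bool) (row : Nat) : Nat → Int
  | 0 => if mask.getD (row + 0) false = false then (0 : Int) else -1
  | x + 1 => if mask.getD (row + (x + 1)) false = false then ((x + 1 : Nat) : Int) else nlI mask row x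

def nrI (mask : List Bool) (row width x : Nat) : Int :=
  if _h : x < width then
    if mask.getD (row + x) false = false then (x : Int) else nrI mask row width (x + 1)
  else -1
termination_by width - x

def fmE (px : List Int) (mask : List Bool) (row width x : Nat) : Int :=
  if mask.getD (row + x) false = false then px.getD (row + x) 0
  else
    let l := nlI mask row x
    let r := nrI mask row width x
    if 0 ≤ l ∧ 0 ≤ r then
      let span := r - l
      let t := (x : Int) - l
      PySem.Int.floordiv (px.getD (row + l.toNat) 0 * (span - t) + px.getD (row + r.toNat) 0 * t + PySem.Int.floordiv span 2) span
    else if 0 ≤ l then px.getD (row + l.toNat) 0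
    else if 0 ≤ r then px.getD (row + r.toNat) 0
    else 255

theorem fre_le (mask : List Bool) (row width : Nat) :
    ∀ x, x ≤ width → fmFindRunEnd mask row width x ≤ width := by
  intro x
  induction x using fmFindRunEnd.induct mask row width with
  | case1 x h ih => intro _; rw [fmFindRunEnd, dif_pos h]; exact ih (by omega)
  | case2 x h => intro hx; rw [fmFindRunEnd, dif_neg h]; exact hx

theorem fre_run (mask : List Bool) (row width : Nat) :
    ∀ x j, x ≤ j → j < fmFindRunEnd mask row width x → mask.getD (row + j) false = true := by
  intro x
  induction x using fmFindRunEnd.induct mask row width with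
  | case1 x h ih =>
    intro j hj hlt
    rw [fmFindRunEnd, dif_pos h] at hlt
    rcases Nat.eq_or_lt_of_le hj with rfl | hj'
    · exact h.2
    · exact ih j hj' hlt
  | case2 x h =>
    intro j hj hlt
    rw [fmFindRunEnd, dif_neg h] at hlt
    omega

theorem fre_stop (mask : List Bool) (row width : Nat) :
    ∀ x, fmFindRunEnd mask row width x < width →
      mask.getD (row + fmFindRunEnd mask row width x) false = false := by
  intro x
  induction x using fmFindRunEnd.induct mask row width with
  | case1 x h ih => rw [fmFindRunEnd, dif_pos h]; exact ih
  | case2 x h =>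
    rw [fmFindRunEnd, dif_neg h]
    intro hlt
    rcases Bool.eq_false_or_eq_true (mask.getD (row + x) false) with hm | hm
    · exact absurd ⟨hlt, hm⟩ h
    · exact hm

theorem nlI_unmasked (mask : List Bool) (row x : Nat) (h : mask.getD (row + x) false = false) :
    nlI mask row x = (x : Int) := by
  cases x with
  | zero => rw [nlI, if_pos h]; norm_num
  | succ x => rw [nlI, if_pos h]

theorem nlI_run (mask : List Bool) (row : Nat) (s : Nat)
    (hs : s = 0 ∨ mask.getD (row + (s - 1)) false = false) :
    ∀ x, (∀ j, s ≤ j → j ≤ x → mask.getD (row + j) false = true) → s ≤ x →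
    nlI mask row x = (s : Int) - 1 := by
  intro x
  induction x with
  | zero =>
    intro hrun hsx
    have hs0 : s = 0 := by omega
    have hm := hrun 0 (by omega) (by omega)
    rw [nlI, if_neg (by simp only [hm]; decide)]
    simp [hs0]
  | succ x ih =>
    intro hrun hsx
    have hm := hrun (x + 1) hsx (by omega)
    rw [nlI, if_neg (by simp only [hm]; decide)]
    rcases Nat.eq_or_lt_of_le hsx with rfl | hlt
    · rcases hs with hs0 | hs1
      · omega
      · rw [nlI_unmasked mask row x (by simpa using hs1)]
        push_cast; ring
    · exact ih (fun j h1 h2 => hrun j h1 (by omega)) (by omega)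

theorem nrI_run (mask : List Bool) (row width : Nat) (e : Nat)
    (he : width ≤ e ∨ mask.getD (row + e) false = false) (hew : e ≤ width) :
    ∀ n x, e = x + n → (∀ j, x ≤ j → j < e → mask.getD (row + j) false = true) →
    nrI mask row width x = if e < width then (e : Int) else -1 := by
  intro n
  induction n with
  | zero =>
    intro x hx hrun
    rw [hx]
    simp only [Nat.add_zero]
    by_cases hw : x < width
    · rw [if_pos hw]
      have hm : mask.getD (row + x) false = false := by
        rcases he with h | h
        · omega
        · rw [show x = e from by omega]; exact h
      rw [nrI, dif_pos hw, if_pos hm]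
    · rw [if_neg hw, nrI, dif_neg hw]
  | succ n ih =>
    intro x hx hrun
    have hxw : x < width := by omega
    have hm := hrun x (by omega) (by omega)
    rw [nrI, dif_pos hxw, if_neg (by simp only [hm]; decide)]
    exact ih (x + 1) (by omega) (fun j h1 h2 => hrun j (by omega) h2)

theorem fmInterpA_eq (row : Nat) (lv rv span lx : Int) (stop : Nat) :
    ∀ n xi (out : List Int), stop - xi = n → xi ≤ stop → row + stop ≤ out.length →
    fmInterpA row lv rv span lx stop xi out
      = out.take (row + xi)
        ++ (List.range' xi (stop - xi)).map
            (fun (j : Nat) => PySem.Int.floordiv (lv * (span - ((j : Int) - lx)) + rv * ((j : Int) - lx) + PySem.Int.floordiv span 2) span)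
        ++ out.drop (row + stop) := by
  intro n
  induction n with
  | zero =>
    intro xi out hn hxi hlen
    have hxs : xi = stop := by omega
    subst hxs
    rw [fmInterpA, dif_neg (by omega)]
    simp
  | succ n ih =>
    intro xi out hn hxi hlen
    have hlt : xi < stop := by omega
    rw [fmInterpA, dif_pos hlt]
    set v := PySem.Int.floordiv (lv * (span - ((xi : Int) - lx)) + rv * ((xi : Int) - lx) + PySem.Int.floordiv span 2) span with hv
    have hix : row + xi < out.length := by omega
    rw [ih (xi + 1) (out.set (row + xi) v) (by omega) (by omega) (by simpa using hlen)]
    have h1 : (out.set (row + xi) v).take (row + xi + 1) = out.take (row + xi) ++ [v] := by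
      rw [List.take_add_one, List.take_set_of_le (by omega), List.getElem?_set_self hix]
      rfl
    have h2 : (out.set (row + xi) v).drop (row + stop) = out.drop (row + stop) := by
      exact List.drop_set_of_lt (by omega)
    simp only [← Nat.add_assoc]
    rw [h1, h2]
    have h3 : stop - xi = (stop - (xi + 1)) + 1 := by omega
    rw [h3, List.range'_succ]
    simp only [List.map_cons, List.append_assoc, List.singleton_append]
    rw [hv]

theorem splice_take (out repl : List Int) (a b : Nat) (hb : a + repl.length = b) (ha : a ≤ out.length) :
    (out.take a ++ repl ++ out.drop b).take b = out.take a ++ repl := by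
  rw [List.append_assoc]
  rw [← List.append_assoc]
  exact List.take_left' (by simp [Nat.min_eq_left ha]; omega)

theorem splice_drop (out repl : List Int) (a b c : Nat) (hb : a + repl.length = b) (ha : a ≤ out.length) (hc : b ≤ c) :
    (out.take a ++ repl ++ out.drop b).drop c = out.drop c := by
  obtain ⟨k, rfl⟩ : ∃ k, c = b + k := ⟨c - b, by omega⟩
  have h1 : (out.take a ++ repl ++ out.drop b).drop b = out.drop b :=
    List.drop_left' (by simp [Nat.min_eq_left ha]; omega)
  calc (out.take a ++ repl ++ out.drop b).drop (b + k)
      = ((out.take a ++ repl ++ out.drop b).drop b).drop k := by rw [List.drop_drop, Nat.add_comm]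
    _ = (out.drop b).drop k := by rw [h1]
    _ = out.drop (b + k) := by rw [List.drop_drop, Nat.add_comm]

theorem getD_of_drop_eq (l1 l2 : List Int) (b i : Nat) (h : l1.drop b = l2.drop b) (hi : b ≤ i) :
    l1.getD i 0 = l2.getD i 0 := by
  obtain ⟨k, rfl⟩ : ∃ k, i = b + k := ⟨i - b, by omega⟩
  have h1 : l1[b + k]? = l2[b + k]? := by
    rw [← List.getElem?_drop, ← List.getElem?_drop, h]
  simp [List.getD, h1]

theorem fmScanA_eq (px : List Int) (mask : List Bool) (row width : Nat)
    (hrow : row + width ≤ px.length) :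
    ∀ n x (out : List Int), width - x = n → x ≤ width → out.length = px.length →
    (x = 0 ∨ mask.getD (row + (x - 1)) false = false ∨ (x < width → mask.getD (row + x) false = false)) →
    (∀ j, x ≤ j → j < width → mask.getD (row + j) false = false → out.getD (row + j) 0 = px.getD (row + j) 0) →
    fmScanA px mask row width x out
      = out.take (row + x) ++ (List.range' x (width - x)).map (fmE px mask row width) ++ out.drop (row + width) := by
  intro n
  induction n using Nat.strong_induction_on with
  | _ n ih =>
  intro x out hn hx hlen hinv hout
  by_cases hxw : x < width
  case neg =>
    rw [fmScanA, dif_neg hxw]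
    have hxe : x = width := by omega
    subst hxe
    simp [List.take_append_drop]
  case pos =>
  rw [fmScanA, dif_pos hxw]
  by_cases hm : mask.getD (row + x) false = false
  · rw [if_pos hm]
    rw [ih (width - (x + 1)) (by omega) (x + 1) out rfl (by omega) hlen
      (Or.inr (Or.inl (by simpa using hm)))
      (fun j h1 h2 h3 => hout j (by omega) h2 h3)]
    have hfx : fmE px mask row width x = out.getD (row + x) 0 := by
      rw [fmE, if_pos hm]; exact (hout x le_rfl hxw hm).symm
    have hix : row + x < out.length := by omega
    have hbecome : out.take (row + (x + 1)) = out.take (row + x) ++ [out.getD (row + x) 0] := by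
      rw [← Nat.add_assoc, List.take_add_one, List.getElem?_eq_getElem hix]
      simp [List.getD, List.getElem?_eq_getElem hix]
    have h3 : width - x = (width - (x + 1)) + 1 := by omega
    rw [hbecome, h3, List.range'_succ]
    simp only [List.map_cons, List.append_assoc, List.singleton_append]
    rw [hfx]
  · rw [if_neg hm]
    dsimp only
    set x1 := fmFindRunEnd mask row width (x + 1) with hx1def
    have hmt : mask.getD (row + x) false = true := by
      rcases Bool.eq_false_or_eq_true (mask.getD (row + x) false) with h | h
      · exact h
      · exact absurd h hm
    have hinv2 : x = 0 ∨ mask.getD (row + (x - 1)) false = false := by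
      rcases hinv with h | h | h
      · exact Or.inl h
      · exact Or.inr h
      · exact absurd (h hxw) hm
    have hx1ge : x + 1 ≤ x1 := fmFindRunEnd_ge mask row width (x + 1)
    have hx1le : x1 ≤ width := fre_le mask row width (x + 1) (by omega)
    have hrun : ∀ j, x ≤ j → j < x1 → mask.getD (row + j) false = true := by
      intro j h1 h2
      rcases Nat.eq_or_lt_of_le h1 with rfl | h1'
      · exact hmt
      · exact fre_run mask row width (x + 1) j (by omega) h2
    have hstop : x1 < width → mask.getD (row + x1) false = false := fre_stop mask row width (x + 1)
    have hnl : ∀ j, x ≤ j → j < x1 → nlI mask row j = (x : Int) - 1 := by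
      intro j h1 h2
      exact nlI_run mask row x hinv2 j (fun j' a b => hrun j' a (by omega)) h1
    have hnr : ∀ j, x ≤ j → j < x1 → nrI mask row width j =
        (if x1 < width then (x1 : Int) else -1) := by
      intro j h1 h2
      refine nrI_run mask row width x1 ?_ hx1le (x1 - j) j (by omega)
        (fun j' a b => hrun j' (by omega) b)
      by_cases hw : x1 < width
      · exact Or.inr (hstop hw)
      · exact Or.inl (by omega)
    have hEj : ∀ R : Int, (if x1 < width then (x1 : Int) else -1) = R →
        ∀ j, x ≤ j → j < x1 → fmE px mask row width j =
        (if 0 ≤ (x : Int) - 1 ∧ 0 ≤ R then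
          PySem.Int.floordiv
            (px.getD (row + ((x : Int) - 1).toNat) 0 * ((R - ((x : Int) - 1)) - ((j : Int) - ((x : Int) - 1)))
              + px.getD (row + R.toNat) 0 * ((j : Int) - ((x : Int) - 1))
              + PySem.Int.floordiv (R - ((x : Int) - 1)) 2)
            (R - ((x : Int) - 1))
        else if 0 ≤ (x : Int) - 1 then px.getD (row + ((x : Int) - 1).toNat) 0
        else if 0 ≤ R then px.getD (row + R.toNat) 0
        else 255) := by
      intro R hR j h1 h2
      rw [fmE, if_neg (by simp only [hrun j h1 h2]; decide)]
      dsimp only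
      rw [hnl j h1 h2, hnr j h1 h2, hR]
    have key : ∀ repl : List Int,
        repl = (List.range' x (x1 - x)).map (fmE px mask row width) →
        fmScanA px mask row width x1 (out.take (row + x) ++ repl ++ out.drop (row + x1))
          = out.take (row + x) ++ (List.range' x (width - x)).map (fmE px mask row width) ++ out.drop (row + width) := by
      intro repl hrepl
      have hreplen : repl.length = x1 - x := by rw [hrepl]; simp
      have hb : (row + x) + repl.length = row + x1 := by omega
      have ha : row + x ≤ out.length := by omega
      have hsplen : (out.take (row + x) ++ repl ++ out.drop (row + x1)).length = px.length := by
        simp [hreplen]; omega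
      have hdropeq : (out.take (row + x) ++ repl ++ out.drop (row + x1)).drop (row + x1) = out.drop (row + x1) :=
        splice_drop out repl (row + x) (row + x1) (row + x1) hb ha le_rfl
      rw [ih (width - x1) (by omega) x1 _ rfl hx1le hsplen
        (Or.inr (Or.inr hstop))
        (by
          intro j h1 h2 h3
          have hg : (out.take (row + x) ++ repl ++ out.drop (row + x1)).getD (row + j) 0 = out.getD (row + j) 0 :=
            getD_of_drop_eq _ _ (row + x1) (row + j) hdropeq (by omega)
          rw [hg]
          exact hout j (by omega) h2 h3)]
      rw [splice_take out repl (row + x) (row + x1) hb ha]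
      rw [splice_drop out repl (row + x) (row + x1) (row + width) hb ha (by omega)]
      rw [hrepl]
      have hranges : List.range' x (x1 - x) ++ List.range' x1 (width - x1) = List.range' x (width - x) := by
        have e1 : x1 = x + (x1 - x) := by omega
        calc List.range' x (x1 - x) ++ List.range' x1 (width - x1)
            = List.range' x (x1 - x) ++ List.range' (x + (x1 - x)) (width - x1) := by rw [← e1]
          _ = List.range' x ((x1 - x) + (width - x1)) := List.range'_append_1
          _ = List.range' x (width - x) := by rw [show (x1 - x) + (width - x1) = width - x from by omega]
      conv_rhs => rw [← hranges, List.map_append]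
      simp [List.append_assoc]
    have hlxN : x = 0 → (if (((x : Nat) : Int) - 1 < 0) ∨ mask.getD (row + (((x : Nat) : Int) - 1).toNat) false = true then (-1 : Int) else ((x : Nat) : Int) - 1) = -1 := by
      intro h0; rw [if_pos (Or.inl (by omega))]
    have hlxP : x ≠ 0 → (if (((x : Nat) : Int) - 1 < 0) ∨ mask.getD (row + (((x : Nat) : Int) - 1).toNat) false = true then (-1 : Int) else ((x : Nat) : Int) - 1) = (x : Int) - 1 := by
      intro h0
      have hmprev : mask.getD (row + ((x : Int) - 1).toNat) false = false := by
        rw [show (((x : Nat) : Int) - 1).toNat = x - 1 from by omega]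
        rcases hinv2 with h | h
        · omega
        · exact h
      rw [if_neg]
      push Not
      exact ⟨by omega, by simp only [hmprev]; decide⟩
    have hrxP : x1 < width → (if ((width : Int) ≤ ((x1 : Nat) : Int)) ∨ mask.getD (row + x1) false = true then (-1 : Int) else ((x1 : Nat) : Int)) = (x1 : Int) := by
      intro hw
      rw [if_neg]
      push Not
      exact ⟨by omega, by simp only [hstop hw]; decide⟩
    have hrxN : ¬ x1 < width → (if ((width : Int) ≤ ((x1 : Nat) : Int)) ∨ mask.getD (row + x1) false = true then (-1 : Int) else ((x1 : Nat) : Int)) = -1 := by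
      intro hw; rw [if_pos (Or.inl (by omega))]
    by_cases hx0 : x = 0
    · by_cases hx1w : x1 < width
      · rw [hlxN hx0, hrxP hx1w]
        rw [if_neg (by intro h; have := h.1; omega)]
        rw [if_neg (by intro h; omega)]
        rw [if_pos (by omega)]
        rw [show x1 - 1 - x + 1 = x1 - x from by omega, show row + (x1 - 1) + 1 = row + x1 from by omega]
        apply key
        symm
        calc (List.range' x (x1 - x)).map (fmE px mask row width)
            = (List.range' x (x1 - x)).map (fun _ => px.getD (row + ((x1 : Int)).toNat) 0) := by
              apply List.map_congr_left
              intro j hj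
              rw [List.mem_range'_1] at hj
              rw [hEj (x1 : Int) (if_pos hx1w) j (by omega) (by omega)]
              rw [if_neg (by intro h; have := h.1; omega), if_neg (by intro h; omega), if_pos (by omega)]
          _ = List.replicate (x1 - x) (px.getD (row + ((x1 : Int)).toNat) 0) := by
              rw [List.map_const', List.length_range']
      · rw [hlxN hx0, hrxN hx1w]
        rw [if_neg (by intro h; have := h.1; omega)]
        rw [if_neg (by intro h; omega)]
        rw [if_neg (by intro h; omega)]
        rw [show x1 - 1 - x + 1 = x1 - x from by omega, show row + (x1 - 1) + 1 = row + x1 from by omega]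
        apply key
        symm
        calc (List.range' x (x1 - x)).map (fmE px mask row width)
            = (List.range' x (x1 - x)).map (fun _ => (255 : Int)) := by
              apply List.map_congr_left
              intro j hj
              rw [List.mem_range'_1] at hj
              rw [hEj (-1 : Int) (if_neg hx1w) j (by omega) (by omega)]
              rw [if_neg (by intro h; have := h.1; omega), if_neg (by intro h; omega), if_neg (by intro h; omega)]
          _ = List.replicate (x1 - x) (255 : Int) := by
              rw [List.map_const', List.length_range']
    · by_cases hx1w : x1 < width
      · rw [hlxP hx0, hrxP hx1w]
        rw [if_pos ⟨by omega, by omega, by omega⟩]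
        rw [show x1 - 1 + 1 = x1 from by omega]
        rw [fmInterpA_eq row _ _ _ _ x1 (x1 - x) x out rfl (by omega) (by omega)]
        apply key
        apply List.map_congr_left
        intro j hj
        rw [List.mem_range'_1] at hj
        rw [hEj (x1 : Int) (if_pos hx1w) j (by omega) (by omega)]
        rw [if_pos ⟨by omega, by omega⟩]
      · rw [hlxP hx0, hrxN hx1w]
        rw [if_neg (by intro h; have := h.2.1; omega)]
        rw [if_pos (by omega)]
        rw [show x1 - 1 - x + 1 = x1 - x from by omega, show row + (x1 - 1) + 1 = row + x1 from by omega]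
        apply key
        symm
        calc (List.range' x (x1 - x)).map (fmE px mask row width)
            = (List.range' x (x1 - x)).map (fun _ => px.getD (row + ((x : Int) - 1).toNat) 0) := by
              apply List.map_congr_left
              intro j hj
              rw [List.mem_range'_1] at hj
              rw [hEj (-1 : Int) (if_neg hx1w) j (by omega) (by omega)]
              rw [if_neg (by intro h; have := h.2; omega), if_pos (by omega)]
          _ = List.replicate (x1 - x) (px.getD (row + ((x : Int) - 1).toNat) 0) := by
              rw [List.map_const', List.length_range']

theorem nrI_stop (mask : List Bool) (row width x : Nat) (h : ¬ x < width) : nrI mask row width x = -1 := by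
  rw [nrI, dif_neg h]

theorem fmLeftGo_eq (mask : List Bool) (row width : Nat) :
    ∀ n x (last : Int) (acc : List Int), width - x = n → x ≤ width →
    last = (match x with | 0 => (-1 : Int) | x' + 1 => nlI mask row x') →
    fmLeftGo mask row width x last acc = acc ++ (List.range' x (width - x)).map (nlI mask row) := by
  intro n
  induction n with
  | zero =>
    intro x last acc hn hx _
    rw [fmLeftGo, dif_neg (by omega)]
    simp [hn]
  | succ n ih =>
    intro x last acc hn hx hlast
    have hxw : x < width := by omega
    rw [fmLeftGo, dif_pos hxw]
    have hlast' : (if mask.getD (row + x) false = false then (x : Int) else last) = nlI mask row x := by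
      cases x with
      | zero =>
        by_cases hm : mask.getD (row + 0) false = false
        · rw [if_pos hm, nlI, if_pos hm]; norm_num
        · rw [if_neg hm, nlI, if_neg hm, hlast]
      | succ x' =>
        by_cases hm : mask.getD (row + (x' + 1)) false = false
        · rw [if_pos hm, nlI, if_pos hm]
        · rw [if_neg hm, nlI, if_neg hm, hlast]
    rw [hlast']
    rw [ih (x + 1) (nlI mask row x) (acc ++ [nlI mask row x]) (by omega) (by omega) rfl]
    have h3 : width - x = (width - (x + 1)) + 1 := by omega
    rw [h3, List.range'_succ]
    simp [List.append_assoc]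

theorem fmRightGo_eq (mask : List Bool) (row width : Nat) :
    ∀ x (nxt : Int) (acc : List Int), x ≤ width → nxt = nrI mask row width x →
    fmRightGo mask row x nxt acc = acc ++ ((List.range x).reverse.map (nrI mask row width)) := by
  intro x
  induction x with
  | zero => intro nxt acc _ _; simp [fmRightGo]
  | succ x ih =>
    intro nxt acc hx hnxt
    have hxw : x < width := by omega
    rw [fmRightGo]
    have hnxt' : (if mask.getD (row + x) false = false then (x : Int) else nxt) = nrI mask row width x := by
      by_cases hm : mask.getD (row + x) false = false
      · rw [if_pos hm, nrI, dif_pos hxw, if_pos hm]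
      · rw [if_neg hm, nrI, dif_pos hxw, if_neg hm, hnxt]
    rw [hnxt']
    rw [ih (nrI mask row width x) _ (by omega) rfl]
    rw [List.range_succ, List.reverse_append]
    simp [List.append_assoc]

theorem fmOutGo_eq (px : List Int) (mask : List Bool) (row width : Nat) :
    ∀ n x (out : List Int), width - x = n →
    fmOutGo px mask row width ((List.range width).map (nlI mask row)) ((List.range width).map (nrI mask row width)) x out
      = out ++ (List.range' x (width - x)).map (fmE px mask row width) := by
  intro n
  induction n with
  | zero =>
    intro x out hn
    rw [fmOutGo, dif_neg (by omega)]
    simp [hn]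
  | succ n ih =>
    intro x out hn
    have hxw : x < width := by omega
    rw [fmOutGo, dif_pos hxw]
    have hL : ((List.range width).map (nlI mask row)).getD x 0 = nlI mask row x := by
      simp [List.getD, hxw]
    have hR : ((List.range width).map (nrI mask row width)).getD x 0 = nrI mask row width x := by
      simp [List.getD, hxw]
    rw [hL, hR]
    rw [ih (x + 1) _ (by omega)]
    have h3 : width - x = (width - (x + 1)) + 1 := by omega
    rw [h3, List.range'_succ]
    simp only [List.map_cons, List.append_assoc, List.singleton_append]
    rw [fmE]

theorem A_rows (px : List Int) (mask : List Bool) (w : Nat) :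
    ∀ h : Nat, w * h ≤ px.length →
    (List.range h).foldl (fun out y => fmScanA px mask (y * w) w 0 out) px
      = (List.range h).flatMap (fun y => (List.range w).map (fmE px mask (y * w) w)) ++ px.drop (w * h) := by
  intro h
  induction h with
  | zero => intro _; simp
  | succ h ih =>
    intro hlen
    have hlen' : w * h ≤ px.length := le_trans (Nat.mul_le_mul_left w (Nat.le_succ h)) hlen
    rw [List.range_succ, List.foldl_append, List.foldl_cons, List.foldl_nil, ih hlen']
    set flat := (List.range h).flatMap (fun y => (List.range w).map (fmE px mask (y * w) w)) with hflat
    have hflatlen : flat.length = h * w := by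
      rw [hflat]
      simp [List.length_flatMap, List.map_const', List.sum_replicate, smul_eq_mul]
    have hS : (flat ++ px.drop (w * h)).length = px.length := by
      have e2 : h * w = w * h := Nat.mul_comm h w
      simp [hflatlen]
      omega
    have hdropS : (flat ++ px.drop (w * h)).drop (h * w) = px.drop (h * w) := by
      rw [Nat.mul_comm h w, List.drop_left' (by rw [hflatlen, Nat.mul_comm])]
    have hrow : h * w + w ≤ px.length := by
      have : w * (h + 1) = h * w + w := by ring
      omega
    rw [fmScanA_eq px mask (h * w) w hrow (w - 0) 0 (flat ++ px.drop (w * h)) rfl (by omega) hS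
      (Or.inl rfl)
      (by
        intro j _ hj _
        exact getD_of_drop_eq _ px (h * w) (h * w + j) hdropS (by omega))]
    rw [List.take_left' (by rw [hflatlen]; omega)]
    have hdrop2 : (flat ++ px.drop (w * h)).drop (h * w + w) = px.drop (w * (h + 1)) := by
      rw [← hflatlen, List.drop_length_add_append, List.drop_drop]
      rw [show w * h + w = w * (h + 1) from by ring]
    rw [hdrop2]
    rw [List.flatMap_append, List.flatMap_cons, List.flatMap_nil, List.append_nil]
    rw [Nat.sub_zero, ← List.range_eq_range']

theorem B_rows (px : List Int) (mask : List Bool) (w h : Nat) :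
    (List.range h).foldl
      (fun out y => fmOutGo px mask (y * w) w (fmLeftGo mask (y * w) w 0 (-1) [])
        ((fmRightGo mask (y * w) w (-1) []).reverse) 0 out) []
      = (List.range h).flatMap (fun y => (List.range w).map (fmE px mask (y * w) w)) := by
  have hbody : (fun (out : List Int) (y : Nat) => fmOutGo px mask (y * w) w (fmLeftGo mask (y * w) w 0 (-1) [])
        ((fmRightGo mask (y * w) w (-1) []).reverse) 0 out)
      = fun out y => out ++ (List.range w).map (fmE px mask (y * w) w) := by
    funext out y
    rw [fmLeftGo_eq mask (y * w) w (w - 0) 0 (-1) [] rfl (by omega) rfl]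
    rw [fmRightGo_eq mask (y * w) w w (-1) [] le_rfl (nrI_stop mask (y * w) w w (by omega)).symm]
    simp only [List.nil_append, Nat.sub_zero]
    rw [← List.range_eq_range']
    rw [List.map_reverse, List.reverse_reverse]
    rw [fmOutGo_eq px mask (y * w) w (w - 0) 0 out rfl]
    rw [Nat.sub_zero, ← List.range_eq_range']
  rw [hbody, PySem.List.foldl_append_eq_flatMap, List.nil_append]

theorem fill_mask_lr_continuum_py_spec : Claim_equal_fill_mask_lr_continuum_py := by
  intro px mask width height _ hpre
  unfold Spec_fill_mask_lr_continuum_py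
  unfold fill_mask_lr_continuum_py fill_mask_lr_continuum_py_alt
  by_cases hdeg : width ≤ 0 ∨ height ≤ 0
  · rw [if_pos hdeg]
    by_cases hh : height ≤ 0
    · have h0 : height.toNat = 0 := by omega
      rw [h0]
      simp
    · have hw0 : width.toNat = 0 := by omega
      have hscan : ∀ (o : List Int) (y : Nat), fmScanA px mask (y * width.toNat) width.toNat 0 o = o := by
        intro o y
        rw [fmScanA, dif_neg (by omega)]
      simp only [hscan]
      exact List.foldl_fixed _
  · rw [if_neg hdeg]
    push Not at hdeg
    obtain ⟨hwpos, hhpos⟩ := hdeg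
    obtain ⟨hpx, _⟩ := hpre hwpos hhpos
    have hwh : width.toNat * height.toNat ≤ px.length := by
      have h1 : ((width.toNat * height.toNat : Nat) : Int) = width * height := by
        push_cast
        rw [Int.toNat_of_nonneg (by omega), Int.toNat_of_nonneg (by omega)]
      omega
    rw [A_rows px mask width.toNat height.toNat hwh]
    dsimp only
    rw [B_rows px mask width.toNat height.toNat]
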